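-- pv_equiv track=rewrite | github.com/ocavue/leetcode | 200.number-of-islands.py | numIslands
-- ===== SOURCE A (Python) =====
-- from typing import List, Union
--
-- NEW_LAND = "1"
--
-- def dfs(grid: List[List[Union[str, int]]], i: int, j: int, island_code: int):
--     if 0 <= i < len(grid) and 0 <= j < len(grid[0]) and grid[i][j] == NEW_LAND:
--         grid[i][j] = island_code
--         dfs(grid, i - 1, j, island_code)
--         dfs(grid, i + 1, j, island_code)
--         dfs(grid, i, j - 1, island_code)
--         dfs(grid, i, j + 1, island_code)
--
-- def numIslands(grid: List[List[Union[str, int]]]) -> int: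
--     if not grid:
--         return 0
--
--     island_code = 0
--
--     for i in range(len(grid)):
--         for j in range(len(grid[0])):
--             if grid[i][j] == NEW_LAND:
--                 dfs(grid, i, j, island_code)
--                 island_code += 1
--
--     return island_code
-- ===== SOURCE B (Python) =====
-- NEW_LAND = "1"
--
-- def numIslands(grid):
--     # Iterative flood fill with an explicit stack (same in-place marking as A).
--     if not grid:
--         return 0
--     rows, cols = len(grid), len(grid[0])
--     island_code = 0
--     for i in range(rows):
--         for j in range(cols):
--             if grid[i][j] == NEW_LAND:
--                 stack = [(i, j)]
--                 while stack:
--                     a, b = stack.pop()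
--                     if 0 <= a < rows and 0 <= b < cols and grid[a][b] == NEW_LAND:
--                         grid[a][b] = island_code
--                         stack += [(a, b + 1), (a, b - 1), (a + 1, b), (a - 1, b)]
--                 island_code += 1
--     return island_code
-- ===== Notes on version B (the rewrite author's own statement) =====
-- stated objective: idiomatic
-- what changed: Replaces A's recursive four-way DFS helper with an iterative flood fill over an explicit stack of coordinates, avoiding Python recursion depth; same in-place marking and count.
import Mathlib
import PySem

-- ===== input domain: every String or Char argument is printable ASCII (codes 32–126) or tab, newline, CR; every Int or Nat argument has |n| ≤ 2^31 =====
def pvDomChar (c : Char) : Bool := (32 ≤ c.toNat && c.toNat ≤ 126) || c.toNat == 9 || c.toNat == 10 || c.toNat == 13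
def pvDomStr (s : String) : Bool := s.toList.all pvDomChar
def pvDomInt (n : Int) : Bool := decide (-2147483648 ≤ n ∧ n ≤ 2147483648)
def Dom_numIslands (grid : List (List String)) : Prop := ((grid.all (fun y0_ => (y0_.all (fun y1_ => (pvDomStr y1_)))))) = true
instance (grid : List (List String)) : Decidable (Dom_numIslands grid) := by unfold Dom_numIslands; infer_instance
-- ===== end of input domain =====

-- B replaces A's recursive four-way DFS with an iterative flood fill over an explicit
-- stack of coordinates (idiomatic, no Python recursion depth); same count returned.
-- Both Pythons mutate `grid` in place, overwriting each island's "1" cells with the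
-- island's integer code; the equivalence proved here is about the RETURN value only,
-- and the ports write the sentinel "#" instead of the integer code — exact for every
-- subsequent comparison (an int never equals the string "1") and for the result.

-- ===== PORT A =====
-- shared cell test: `0 <= i < len(grid) and 0 <= j < len(grid[0]) and grid[i][j] == NEW_LAND`
-- (identical condition in A's dfs and B's loop body; within the outer scan's ranges the
-- bound checks are always true, so it also ports the outer `grid[i][j] == NEW_LAND` test)
def isLand (g : List (List String)) (i j : Int) : Bool :=
  decide (0 ≤ i) && decide (i < (g.length : Int)) &&
  decide (0 ≤ j) && decide (j < ((g.headD []).length : Int)) &&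
  (((g.getD i.toNat []).getD j.toNat "") == "1")

-- `grid[i][j] = island_code` (sentinel "#", see header comment)
def setCell (g : List (List String)) (i j : Int) : List (List String) :=
  g.modify i.toNat (fun row => row.set j.toNat "#")

-- number of remaining "1" cells: the fuel/termination measure of both ports
def landCount (g : List (List String)) : Nat :=
  (g.flatten.countP (fun s => s == "1"))

theorem countP_set_lt (l : List String) (c : Nat) (hc : c < l.length)
    (hg : l[c] = "1") :
    (l.set c "#").countP (fun s => s == "1") < l.countP (fun s => s == "1") := by
  rw [List.set_eq_take_append_cons_drop, if_pos hc]
  conv_rhs => rw [← List.take_append_drop c l, ← List.getElem_cons_drop hc]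
  simp [List.countP_append, hg]

theorem landCount_set_lt (g : List (List String)) (i j : Int)
    (h : isLand g i j = true) : landCount (setCell g i j) < landCount g := by
  simp only [isLand, Bool.and_eq_true, decide_eq_true_eq, beq_iff_eq] at h
  obtain ⟨⟨⟨⟨hi0, hil⟩, hj0⟩, hjl⟩, hcell⟩ := h
  have hr : i.toNat < g.length := by omega
  have hrowe : g.getD i.toNat [] = g[i.toNat] := by
    simp [List.getD_eq_getElem?_getD, List.getElem?_eq_getElem hr]
  rw [hrowe] at hcell
  have hc : j.toNat < (g[i.toNat]).length := by
    by_contra hge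
    push Not at hge
    rw [List.getD_eq_getElem?_getD, List.getElem?_eq_none hge] at hcell
    simp at hcell
  have hget : (g[i.toNat])[j.toNat] = "1" := by
    rw [List.getD_eq_getElem?_getD, List.getElem?_eq_getElem hc] at hcell
    simpa using hcell
  unfold landCount setCell
  rw [List.modify_eq_set]
  have hrowD : (g[i.toNat]?.getD default) = g[i.toNat] := by
    simp [List.getElem?_eq_getElem hr]
  rw [hrowD]
  rw [List.set_eq_take_append_cons_drop, if_pos hr]
  conv_rhs => rw [← List.take_append_drop i.toNat g, ← List.getElem_cons_drop hr]
  simp only [List.flatten_append, List.flatten_cons, List.countP_append]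
  have := countP_set_lt (g[i.toNat]) j.toNat hc hget
  omega

-- fueled transliteration of A's `dfs` (fuel only guards termination; A's dfs is called
-- with fuel = landCount grid + 1, which is always sufficient — proved below)
def dfsF : Nat → List (List String) → Int → Int → List (List String)
  | 0, g, _, _ => g
  | fuel + 1, g, i, j =>
    if isLand g i j then
      let g0 := setCell g i j
      let g1 := dfsF fuel g0 (i - 1) j
      let g2 := dfsF fuel g1 (i + 1) j
      let g3 := dfsF fuel g2 i (j - 1)
      dfsF fuel g3 i (j + 1)
    else g

def dfsRun (g : List (List String)) (i j : Int) : List (List String) :=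
  dfsF (landCount g + 1) g i j

def numIslands (grid : List (List String)) : Int :=
  if grid = [] then 0 else
  ((List.range grid.length).foldl (fun st i =>
    (List.range (grid.headD []).length).foldl (fun st j =>
      if isLand st.1 (i : Int) (j : Int) then (dfsRun st.1 (i : Int) (j : Int), st.2 + 1)
      else st) st)
    (grid, (0 : Int))).2

-- ===== PORT B =====
-- the while-loop over the explicit stack (list head = top of stack; B pushes the four
-- neighbours so that they pop in the order up, down, left, right)
def fill : List (List String) → List (Int × Int) → List (List String)
  | g, [] => g
  | g, (a, b) :: rest =>
    if h : isLand g a b then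
      fill (setCell g a b) ((a - 1, b) :: (a + 1, b) :: (a, b - 1) :: (a, b + 1) :: rest)
    else fill g rest
termination_by g stack => (landCount g, stack.length)
decreasing_by
  · exact Prod.Lex.left _ _ (landCount_set_lt _ _ _ h)
  · exact Prod.Lex.right _ (by simp)

def numIslands_alt (grid : List (List String)) : Int :=
  if grid = [] then 0 else
  ((List.range grid.length).foldl (fun st i =>
    (List.range (grid.headD []).length).foldl (fun st j =>
      if isLand st.1 (i : Int) (j : Int) then (fill st.1 [((i : Int), (j : Int))], st.2 + 1)
      else st) st)
    (grid, (0 : Int))).2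

-- ===== PRECONDITION & SPEC =====
-- Pre_ excludes exactly the ragged grids on which Python A raises IndexError: the outer
-- scan reads grid[i][j] for every j < len(grid[0]), so any row shorter than row 0 raises.
def Pre_numIslands (grid : List (List String)) : Prop :=
  ∀ row ∈ grid, (grid.headD []).length ≤ row.length

instance (grid : List (List String)) : Decidable (Pre_numIslands grid) := by
  unfold Pre_numIslands; infer_instance

def pvWitness_numIslands : List (List String) :=
  [["1", "0", "1"], ["0", "1", "1"]]

def Spec_numIslands (grid : List (List String)) (out : Int) : Prop := out = numIslands_alt grid
instance (grid : List (List String)) (out : Int) : Decidable (Spec_numIslands grid out) := by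
  unfold Spec_numIslands; infer_instance

-- ===== CLAIM (what is proved, stated in full; the proofs are below) =====
def Claim_equal_numIslands : Prop := ∀ (grid : List (List String)), Dom_numIslands grid → Pre_numIslands grid → Spec_numIslands grid (numIslands grid)

-- ===== LEMMAS AND PROOFS =====

theorem landCount_dfsF_le (fuel : Nat) :
    ∀ (g : List (List String)) (i j : Int), landCount (dfsF fuel g i j) ≤ landCount g := by
  induction fuel with
  | zero => intro g i j; simp [dfsF]
  | succ n ih =>
    intro g i j
    by_cases h : isLand g i j
    · simp only [dfsF, h, if_true]
      have h0 := Nat.le_of_lt (landCount_set_lt g i j h)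
      calc landCount (dfsF n (dfsF n (dfsF n (dfsF n (setCell g i j) (i-1) j) (i+1) j) i (j-1)) i (j+1))
          ≤ landCount (dfsF n (dfsF n (dfsF n (setCell g i j) (i-1) j) (i+1) j) i (j-1)) := ih _ _ _
        _ ≤ landCount (dfsF n (dfsF n (setCell g i j) (i-1) j) (i+1) j) := ih _ _ _
        _ ≤ landCount (dfsF n (setCell g i j) (i-1) j) := ih _ _ _
        _ ≤ landCount (setCell g i j) := ih _ _ _
        _ ≤ landCount g := h0
    · simp [dfsF, h]

-- fuel irrelevance above the threshold landCount g
theorem dfsF_irrel (n : Nat) :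
    ∀ (g : List (List String)) (i j : Int) (f1 f2 : Nat), landCount g ≤ n →
      landCount g < f1 → landCount g < f2 → dfsF f1 g i j = dfsF f2 g i j := by
  induction n with
  | zero =>
    intro g i j f1 f2 hle h1 h2
    obtain ⟨a, rfl⟩ : ∃ a, f1 = a + 1 := ⟨f1 - 1, by omega⟩
    obtain ⟨b, rfl⟩ : ∃ b, f2 = b + 1 := ⟨f2 - 1, by omega⟩
    by_cases h : isLand g i j
    · exact absurd (landCount_set_lt g i j h) (by omega)
    · simp [dfsF, h]
  | succ n ih =>
    intro g i j f1 f2 hle h1 h2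
    by_cases hsmall : landCount g ≤ n
    · exact ih g i j f1 f2 hsmall h1 h2
    · obtain ⟨a, rfl⟩ : ∃ a, f1 = a + 1 := ⟨f1 - 1, by omega⟩
      obtain ⟨b, rfl⟩ : ∃ b, f2 = b + 1 := ⟨f2 - 1, by omega⟩
      by_cases h : isLand g i j
      · simp only [dfsF, h, if_true]
        have h0 : landCount (setCell g i j) ≤ n := by
          have := landCount_set_lt g i j h; omega
        have ha : n < a := by omega
        have hb : n < b := by omega
        have e1 : dfsF a (setCell g i j) (i-1) j = dfsF b (setCell g i j) (i-1) j :=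
          ih _ _ _ _ _ h0 (by omega) (by omega)
        rw [e1]
        set g1 := dfsF b (setCell g i j) (i-1) j with hg1
        have hg1le : landCount g1 ≤ n := le_trans (landCount_dfsF_le _ _ _ _) h0
        have e2 : dfsF a g1 (i+1) j = dfsF b g1 (i+1) j :=
          ih _ _ _ _ _ hg1le (by omega) (by omega)
        rw [e2]
        set g2 := dfsF b g1 (i+1) j with hg2
        have hg2le : landCount g2 ≤ n := le_trans (landCount_dfsF_le _ _ _ _) hg1le
        have e3 : dfsF a g2 i (j-1) = dfsF b g2 i (j-1) :=
          ih _ _ _ _ _ hg2le (by omega) (by omega)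
        rw [e3]
        set g3 := dfsF b g2 i (j-1) with hg3
        have hg3le : landCount g3 ≤ n := le_trans (landCount_dfsF_le _ _ _ _) hg2le
        exact ih _ _ _ _ _ hg3le (by omega) (by omega)
      · simp [dfsF, h]

theorem dfsF_eq_dfsRun (f : Nat) (g : List (List String)) (i j : Int)
    (h : landCount g < f) : dfsF f g i j = dfsRun g i j :=
  dfsF_irrel (landCount g) g i j f (landCount g + 1) le_rfl h (by omega)

theorem landCount_dfsRun_le (g : List (List String)) (i j : Int) :
    landCount (dfsRun g i j) ≤ landCount g := landCount_dfsF_le _ _ _ _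

theorem landCount_foldl_dfsRun_le (cs : List (Int × Int)) :
    ∀ g, landCount (cs.foldl (fun h p => dfsRun h p.1 p.2) g) ≤ landCount g := by
  induction cs with
  | nil => intro g; simp
  | cons c cs ih =>
    intro g
    exact le_trans (ih _) (landCount_dfsRun_le _ _ _)

-- one recursive dfs call = the flood of its four neighbours after marking
theorem dfsRun_land (g : List (List String)) (i j : Int) (h : isLand g i j = true) :
    dfsRun g i j =
      [((i-1 : Int), j), (i+1, j), (i, j-1), (i, j+1)].foldl
        (fun h p => dfsRun h p.1 p.2) (setCell g i j) := by
  have h0 : landCount (setCell g i j) < landCount g := landCount_set_lt g i j h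
  have e1 : dfsF (landCount g) (setCell g i j) (i-1) j = dfsRun (setCell g i j) (i-1) j :=
    dfsF_eq_dfsRun _ _ _ _ h0
  have l1 : landCount (dfsRun (setCell g i j) (i-1) j) ≤ landCount (setCell g i j) :=
    landCount_dfsRun_le _ _ _
  have e2 : dfsF (landCount g) (dfsRun (setCell g i j) (i-1) j) (i+1) j
      = dfsRun (dfsRun (setCell g i j) (i-1) j) (i+1) j :=
    dfsF_eq_dfsRun _ _ _ _ (by omega)
  have l2 : landCount (dfsRun (dfsRun (setCell g i j) (i-1) j) (i+1) j)
      ≤ landCount (dfsRun (setCell g i j) (i-1) j) := landCount_dfsRun_le _ _ _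
  have e3 : dfsF (landCount g) (dfsRun (dfsRun (setCell g i j) (i-1) j) (i+1) j) i (j-1)
      = dfsRun (dfsRun (dfsRun (setCell g i j) (i-1) j) (i+1) j) i (j-1) :=
    dfsF_eq_dfsRun _ _ _ _ (by omega)
  have l3 : landCount (dfsRun (dfsRun (dfsRun (setCell g i j) (i-1) j) (i+1) j) i (j-1))
      ≤ landCount (dfsRun (dfsRun (setCell g i j) (i-1) j) (i+1) j) := landCount_dfsRun_le _ _ _
  have e4 : dfsF (landCount g) (dfsRun (dfsRun (dfsRun (setCell g i j) (i-1) j) (i+1) j) i (j-1)) i (j+1)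
      = dfsRun (dfsRun (dfsRun (dfsRun (setCell g i j) (i-1) j) (i+1) j) i (j-1)) i (j+1) :=
    dfsF_eq_dfsRun _ _ _ _ (by omega)
  conv_lhs => rw [dfsRun, dfsF]
  simp only [h, if_true, List.foldl]
  rw [e1, e2, e3, e4]

theorem dfsRun_notland (g : List (List String)) (i j : Int) (h : isLand g i j = false) :
    dfsRun g i j = g := by
  unfold dfsRun
  rw [dfsF]
  simp [h]

-- the stack loop processes a prefix of the stack exactly as the recursive dfs would
theorem fill_append (n : Nat) :
    ∀ (g : List (List String)), landCount g ≤ n → ∀ (cs rest : List (Int × Int)),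
      fill g (cs ++ rest) = fill (cs.foldl (fun h p => dfsRun h p.1 p.2) g) rest := by
  induction n with
  | zero =>
    intro g hg cs rest
    induction cs generalizing rest with
    | nil => simp
    | cons c cs ihc =>
      obtain ⟨a, b⟩ := c
      by_cases h : isLand g a b
      · exact absurd (landCount_set_lt g a b h) (by omega)
      · rw [List.cons_append, fill]
        simp only [h]
        rw [ihc rest]
        simp [List.foldl, dfsRun_notland g a b (by simpa using h)]
  | succ n ih =>
    intro g hg cs rest
    by_cases hsmall : landCount g ≤ n
    · exact ih g hsmall cs rest
    · induction cs generalizing rest with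
      | nil => simp
      | cons c cs ihc =>
        obtain ⟨a, b⟩ := c
        by_cases h : isLand g a b
        · rw [List.cons_append, fill]
          simp only [h, reduceDIte]
          have h0 : landCount (setCell g a b) ≤ n := by
            have := landCount_set_lt g a b h; omega
          have step1 := ih (setCell g a b) h0
            [((a-1 : Int), b), (a+1, b), (a, b-1), (a, b+1)] (cs ++ rest)
          simp only [List.cons_append, List.nil_append] at step1 ⊢
          rw [step1]
          have h1 : landCount ([((a-1 : Int), b), (a+1, b), (a, b-1), (a, b+1)].foldl
              (fun h p => dfsRun h p.1 p.2) (setCell g a b)) ≤ n :=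
            le_trans (landCount_foldl_dfsRun_le _ _) h0
          rw [ih _ h1 cs rest]
          have hd := dfsRun_land g a b h
          simp only [List.foldl_cons, List.foldl_nil] at hd ⊢
          rw [hd]
        · rw [List.cons_append, fill]
          simp only [h]
          rw [ihc rest]
          simp [List.foldl, dfsRun_notland g a b (by simpa using h)]

theorem fill_single (g : List (List String)) (i j : Int) :
    fill g [(i, j)] = dfsRun g i j := by
  have h := fill_append (landCount g) g le_rfl [(i, j)] []
  simp only [List.cons_append, List.nil_append, List.foldl_cons, List.foldl_nil] at h
  rw [h, fill]

-- ===== VERDICT (by name: the statement is the Claim_ definition above) =====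
theorem numIslands_spec : Claim_equal_numIslands := by
  intro grid _ _
  unfold Spec_numIslands numIslands numIslands_alt
  simp only [fill_single]
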